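-- pv_equiv track=rewrite | github.com/michaeloboyle/scrantenna | shorts/improved_extraction.py | _find_matching_entity_name
-- ===== SOURCE A (Python) =====
-- from typing import List, Dict, Tuple
--
-- def _find_matching_entity_name(text: str, entity_names: List[str]) -> str:
--     """Find entity name that matches or contains the text."""
--     text_lower = text.lower().strip()
--
--     # Exact match
--     for name in entity_names:
--         if name.lower() == text_lower:
--             return name
--
--     # Partial match
--     for name in entity_names:
--         if (text_lower in name.lower() or name.lower() in text_lower) and len(name) > 3:
--             return name
--
--     return None
-- ===== SOURCE B (Python) =====
-- def _find_matching_entity_name(text, entity_names):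
--     """Single pass: return first exact match immediately, remember first partial."""
--     text_lower = text.lower().strip()
--     partial = None
--     for name in entity_names:
--         nl = name.lower()
--         if nl == text_lower:
--             return name
--         if partial is None and (text_lower in nl or nl in text_lower) and len(name) > 3:
--             partial = name
--     return partial
-- ===== Notes on version B (the rewrite author's own statement) =====
-- stated objective: alternative
-- what changed: Fuses A's two separate scans (exact pass, then partial pass) into a single pass that returns an exact match immediately and remembers the first partial candidate in an accumulator returned after the loop.
import Mathlib
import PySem

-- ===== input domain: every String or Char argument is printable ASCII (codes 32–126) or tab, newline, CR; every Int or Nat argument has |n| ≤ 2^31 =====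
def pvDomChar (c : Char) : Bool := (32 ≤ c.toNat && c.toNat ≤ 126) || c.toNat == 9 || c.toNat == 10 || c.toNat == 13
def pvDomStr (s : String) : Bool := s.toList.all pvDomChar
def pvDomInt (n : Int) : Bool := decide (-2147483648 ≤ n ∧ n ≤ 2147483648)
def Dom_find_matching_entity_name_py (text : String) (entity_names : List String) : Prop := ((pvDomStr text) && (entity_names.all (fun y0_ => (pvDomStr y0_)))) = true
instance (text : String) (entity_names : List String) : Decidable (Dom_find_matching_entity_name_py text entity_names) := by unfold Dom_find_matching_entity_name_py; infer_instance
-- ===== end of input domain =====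

-- B fuses A's two scans into one pass with a deferred partial-match accumulator (objective: alternative).

-- ===== PORT A =====
-- first loop of A: exact match
def pvExactScan (tl : String) : List String → Option String
  | [] => none
  | n :: rest => if PySem.Str.lower n == tl then some n else pvExactScan tl rest

-- second loop of A: partial match
def pvPartialScan (tl : String) : List String → Option String
  | [] => none
  | n :: rest =>
    if (PySem.Str.isIn tl (PySem.Str.lower n) || PySem.Str.isIn (PySem.Str.lower n) tl)
        && decide (3 < PySem.Str.len n) then some n
    else pvPartialScan tl rest

def find_matching_entity_name_py (text : String) (entity_names : List String) : Option String :=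
  let text_lower := PySem.Str.strip (PySem.Str.lower text)
  match pvExactScan text_lower entity_names with
  | some n => some n
  | none => pvPartialScan text_lower entity_names

-- ===== PORT B =====
-- one pass: early return on exact match, otherwise remember the first partial candidate
def pvFusedScan (tl : String) (partialAcc : Option String) : List String → Option String
  | [] => partialAcc
  | n :: rest =>
    let nl := PySem.Str.lower n
    if nl == tl then some n
    else
      let partialAcc' :=
        match partialAcc with
        | some p => some p
        | none =>
          if (PySem.Str.isIn tl nl || PySem.Str.isIn nl tl) && decide (3 < PySem.Str.len n)
          then some n else none
      pvFusedScan tl partialAcc' rest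

def find_matching_entity_name_py_alt (text : String) (entity_names : List String) : Option String :=
  let text_lower := PySem.Str.strip (PySem.Str.lower text)
  pvFusedScan text_lower none entity_names

-- ===== PRECONDITION & SPEC =====
def Spec_find_matching_entity_name_py (text : String) (entity_names : List String) (out : Option String) : Prop := out = find_matching_entity_name_py_alt text entity_names
instance (text : String) (entity_names : List String) (out : Option String) : Decidable (Spec_find_matching_entity_name_py text entity_names out) := by unfold Spec_find_matching_entity_name_py; infer_instance

-- ===== CLAIM (what is proved, stated in full; the proofs are below) =====
def Claim_equal_find_matching_entity_name_py : Prop := ∀ (text : String) (entity_names : List String), Dom_find_matching_entity_name_py text entity_names → Spec_find_matching_entity_name_py text entity_names (find_matching_entity_name_py text entity_names)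

-- ===== LEMMAS AND PROOFS =====
lemma pvFusedScan_eq (tl : String) (names : List String) (acc : Option String) :
    pvFusedScan tl acc names =
      match pvExactScan tl names with
      | some n => some n
      | none => match acc with
                | some p => some p
                | none => pvPartialScan tl names := by
  induction names generalizing acc with
  | nil => cases acc <;> simp [pvFusedScan, pvExactScan, pvPartialScan]
  | cons n rest ih =>
    simp only [pvFusedScan, pvExactScan, pvPartialScan]
    by_cases hx : (PySem.Str.lower n == tl) = true
    · simp [hx]
    · simp only [hx, if_false, Bool.false_eq_true]
      rw [ih]
      cases acc with
      | some p => simp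
      | none =>
        split_ifs with hp <;> cases hE : pvExactScan tl rest <;> simp

-- ===== VERDICT (by name: the statement is the Claim_ definition above) =====
theorem find_matching_entity_name_py_spec : Claim_equal_find_matching_entity_name_py := by
  intro text names _
  unfold Spec_find_matching_entity_name_py find_matching_entity_name_py find_matching_entity_name_py_alt
  rw [pvFusedScan_eq]
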